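-- pv_equiv track=rewrite | github.com/maherahmedraza/stellapply | src/modules/resume/ai/enhancement_rules.py | _check_leadership_claims
-- ===== SOURCE A (Python) =====
-- from typing import List, Set, Callable, Dict, Any
--
-- def _check_leadership_claims(
--     original: str, enhanced: str, context: Dict[str, Any]
-- ) -> bool:
--     """Check if leadership claims can be backed by experience."""
--     leadership_verbs = [
--         "led",
--         "managed",
--         "directed",
--         "headed",
--         "supervised",
--         "oversaw",
--         "coordinated",
--         "spearheaded",
--         "orchestrated",
--     ]
--
--     enhanced_lower = enhanced.lower()
--     original_lower = original.lower()
--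
--     for verb in leadership_verbs:
--         if verb in enhanced_lower and verb not in original_lower:
--             responsibilities = context.get("verified_responsibilities", [])
--             has_leadership_evidence = any(
--                 verb in resp.get("description", "").lower()
--                 or "lead" in resp.get("role", "").lower()
--                 or "manager" in resp.get("role", "").lower()
--                 for resp in responsibilities
--             )
--             if not has_leadership_evidence:
--                 return True
--
--     return False
-- ===== SOURCE B (Python) =====
-- from typing import Dict, Any
--
--
-- def _check_leadership_claims(
--     original: str, enhanced: str, context: Dict[str, Any]
-- ) -> bool:
--     """Check if leadership claims can be backed by experience.
--
--     Single-pass variant: find newly-added leadership verbs first; if any,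
--     scan the verified responsibilities once, building the global role
--     evidence flag and the list of lowered descriptions, then test each
--     added verb against that index.
--     """
--     leadership_verbs = [
--         "led",
--         "managed",
--         "directed",
--         "headed",
--         "supervised",
--         "oversaw",
--         "coordinated",
--         "spearheaded",
--         "orchestrated",
--     ]
--
--     enhanced_lower = enhanced.lower()
--     original_lower = original.lower()
--
--     added = [
--         v for v in leadership_verbs
--         if v in enhanced_lower and v not in original_lower
--     ]
--     if not added:
--         return False
--
--     role_evidence = False
--     descriptions = []
--     for resp in context.get("verified_responsibilities", []):
--         role = resp.get("role", "").lower()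
--         if "lead" in role or "manager" in role:
--             role_evidence = True
--         descriptions.append(resp.get("description", "").lower())
--
--     if role_evidence:
--         return False
--     return any(all(v not in d for d in descriptions) for v in added)
-- ===== Notes on version B (the rewrite author's own statement) =====
-- stated objective: simpler
-- what changed: Replaces A's per-verb rescan of the responsibilities (nested any inside the verb loop) with one pass that builds a global role-evidence flag and the list of lowered descriptions, then checks the newly-added verbs against that index.
import Mathlib
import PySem

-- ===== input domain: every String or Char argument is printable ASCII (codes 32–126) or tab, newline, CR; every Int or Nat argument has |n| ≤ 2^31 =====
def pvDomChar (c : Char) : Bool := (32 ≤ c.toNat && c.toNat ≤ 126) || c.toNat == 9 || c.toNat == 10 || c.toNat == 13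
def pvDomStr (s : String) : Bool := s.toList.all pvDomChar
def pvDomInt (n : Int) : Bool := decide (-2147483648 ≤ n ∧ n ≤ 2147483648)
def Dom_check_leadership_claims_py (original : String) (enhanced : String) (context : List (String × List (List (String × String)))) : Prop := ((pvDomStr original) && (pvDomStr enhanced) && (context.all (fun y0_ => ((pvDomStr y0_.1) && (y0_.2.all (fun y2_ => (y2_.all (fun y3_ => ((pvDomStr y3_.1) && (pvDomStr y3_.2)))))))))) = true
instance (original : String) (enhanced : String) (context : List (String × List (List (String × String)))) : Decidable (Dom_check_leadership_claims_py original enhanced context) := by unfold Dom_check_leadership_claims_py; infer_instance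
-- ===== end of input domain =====

-- B replaces A's per-verb rescan of the responsibilities with one indexing pass
-- (global role-evidence flag + list of lowered descriptions); objective: simpler.

def pvVerbs : List String :=
  ["led", "managed", "directed", "headed", "supervised", "oversaw",
   "coordinated", "spearheaded", "orchestrated"]

-- ===== PORT A =====
def check_leadership_claims_py (original : String) (enhanced : String) (context : List (String × List (List (String × String)))) : Bool :=
  let enhanced_lower := PySem.Str.lower enhanced
  let original_lower := PySem.Str.lower original
  -- 'for verb in …: if cond: …; if not evidence: return True' then 'return False'
  pvVerbs.any (fun verb =>
    PySem.Str.isIn verb enhanced_lower && !(PySem.Str.isIn verb original_lower) &&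
      (let responsibilities := (PySem.Dict.mk context).getD "verified_responsibilities" []
       !(responsibilities.any (fun resp =>
          PySem.Str.isIn verb (PySem.Str.lower ((PySem.Dict.mk resp).getD "description" "")) ||
          PySem.Str.isIn "lead" (PySem.Str.lower ((PySem.Dict.mk resp).getD "role" "")) ||
          PySem.Str.isIn "manager" (PySem.Str.lower ((PySem.Dict.mk resp).getD "role" ""))))))

-- ===== PORT B =====
-- helpers of B (role evidence of one responsibility; lowered description)
def pvRoleEv (resp : List (String × String)) : Bool :=
  let role := PySem.Str.lower ((PySem.Dict.mk resp).getD "role" "")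
  PySem.Str.isIn "lead" role || PySem.Str.isIn "manager" role

def pvDescL (resp : List (String × String)) : String :=
  PySem.Str.lower ((PySem.Dict.mk resp).getD "description" "")

def pvStep (p : Bool × List String) (resp : List (String × String)) : Bool × List String :=
  (p.1 || pvRoleEv resp, p.2 ++ [pvDescL resp])

def check_leadership_claims_py_alt (original : String) (enhanced : String) (context : List (String × List (List (String × String)))) : Bool :=
  let enhanced_lower := PySem.Str.lower enhanced
  let original_lower := PySem.Str.lower original
  let added := pvVerbs.filter (fun v =>
    PySem.Str.isIn v enhanced_lower && !(PySem.Str.isIn v original_lower))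
  if added.isEmpty then false
  else
    let resps := (PySem.Dict.mk context).getD "verified_responsibilities" []
    let idx := resps.foldl pvStep (false, [])
    if idx.1 then false
    else added.any (fun v => idx.2.all (fun d => !(PySem.Str.isIn v d)))

-- ===== PRECONDITION & SPEC =====
def Spec_check_leadership_claims_py (original : String) (enhanced : String) (context : List (String × List (List (String × String)))) (out : Bool) : Prop := out = check_leadership_claims_py_alt original enhanced context
instance (original : String) (enhanced : String) (context : List (String × List (List (String × String)))) (out : Bool) : Decidable (Spec_check_leadership_claims_py original enhanced context out) := by unfold Spec_check_leadership_claims_py; infer_instance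

-- ===== CLAIM (what is proved, stated in full; the proofs are below) =====
def Claim_equal_check_leadership_claims_py : Prop := ∀ (original : String) (enhanced : String) (context : List (String × List (List (String × String)))), Dom_check_leadership_claims_py original enhanced context → Spec_check_leadership_claims_py original enhanced context (check_leadership_claims_py original enhanced context)

-- ===== LEMMAS AND PROOFS =====

-- B's indexing pass, characterised: flag = any role evidence, list = lowered descriptions
lemma pv_foldl_step (resps : List (List (String × String))) (b : Bool) (ds : List String) :
    resps.foldl pvStep (b, ds) = (b || resps.any pvRoleEv, ds ++ resps.map pvDescL) := by
  induction resps generalizing b ds with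
  | nil => simp
  | cons r t ih => simp [pvStep, ih, Bool.or_assoc]

lemma pv_anyA (resps : List (List (String × String))) (v : String) :
    (resps.any fun resp =>
        PySem.Str.isIn v (PySem.Str.lower ((PySem.Dict.mk resp).getD "description" "")) ||
        PySem.Str.isIn "lead" (PySem.Str.lower ((PySem.Dict.mk resp).getD "role" "")) ||
        PySem.Str.isIn "manager" (PySem.Str.lower ((PySem.Dict.mk resp).getD "role" ""))) =
      (((resps.map pvDescL).any fun d => PySem.Str.isIn v d) || resps.any pvRoleEv) := by
  induction resps with
  | nil => rfl
  | cons r t ih =>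
      simp only [List.any_cons, List.map_cons, ih, pvDescL, pvRoleEv]
      cases PySem.Str.isIn v (PySem.Str.lower ((PySem.Dict.mk r).getD "description" "")) <;>
      cases PySem.Str.isIn "lead" (PySem.Str.lower ((PySem.Dict.mk r).getD "role" "")) <;>
      cases PySem.Str.isIn "manager" (PySem.Str.lower ((PySem.Dict.mk r).getD "role" "")) <;>
        simp

lemma pv_if_isEmpty (l : List String) (q : String → Bool) :
    (if l.isEmpty then false else l.any q) = l.any q := by
  cases l <;> simp

theorem pv_main (original enhanced : String) (context : List (String × List (List (String × String)))) :
    check_leadership_claims_py original enhanced context =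
      check_leadership_claims_py_alt original enhanced context := by
  unfold check_leadership_claims_py check_leadership_claims_py_alt
  simp only
  set el := PySem.Str.lower enhanced
  set ol := PySem.Str.lower original
  set resps := (PySem.Dict.mk context).getD "verified_responsibilities" []
  rw [pv_foldl_step]
  simp only [List.nil_append, Bool.false_or, pv_anyA]
  by_cases hr : resps.any pvRoleEv = true
  · simp [hr]
  · simp only [Bool.not_eq_true] at hr
    rw [hr]
    simp only [Bool.or_false, Bool.false_eq_true, if_false]
    rw [pv_if_isEmpty, List.any_filter]
    refine List.any_congr rfl (fun v => ?_)
    cases PySem.Str.isIn v el && !(PySem.Str.isIn v ol) <;>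
      simp [List.all_eq_not_any_not]

-- ===== VERDICT (by name: the statement is the Claim_ definition above) =====
theorem check_leadership_claims_py_spec : Claim_equal_check_leadership_claims_py := by
  intro original enhanced context _
  unfold Spec_check_leadership_claims_py
  exact pv_main original enhanced context
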